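-- pv_equiv track=rewrite | github.com/DannyLee12/aoc | 2022/25.py | convert
-- ===== SOURCE A (Python) =====
-- def convert(value: str):
--     total = 0
--     multiplier = 1
--     for val in reversed(value):
--         if val == '-':
--             total -= multiplier
--         elif val == '=':
--             total -= 2 * multiplier
--         else:
--             total += int(val) * multiplier
--
--         multiplier *= 5
--
--     return total
-- ===== SOURCE B (Python) =====
-- def convert(value: str):
--     total = 0
--     for char in value:
--         if char == '-':
--             d = -1
--         elif char == '=':
--             d = -2
--         else:
--             d = int(char)
--         total = total * 5 + d
--     return total
-- ===== Notes on version B (the rewrite author's own statement) =====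
-- stated objective: idiomatic
-- what changed: Replaced the reverse traversal with an explicit place-value multiplier by a forward Horner pass maintaining a single accumulator (total = total*5 + digit).
import Mathlib
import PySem

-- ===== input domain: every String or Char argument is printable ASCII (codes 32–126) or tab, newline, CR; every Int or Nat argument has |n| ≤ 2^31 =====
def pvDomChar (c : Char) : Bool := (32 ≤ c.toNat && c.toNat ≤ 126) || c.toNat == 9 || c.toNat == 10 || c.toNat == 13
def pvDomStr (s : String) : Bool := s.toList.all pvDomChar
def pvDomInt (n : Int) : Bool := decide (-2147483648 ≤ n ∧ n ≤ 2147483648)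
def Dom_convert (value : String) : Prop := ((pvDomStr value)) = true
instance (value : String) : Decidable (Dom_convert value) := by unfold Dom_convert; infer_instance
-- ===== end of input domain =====

-- B rewrites A's reversed place-value-multiplier loop as a forward Horner pass (idiomatic; same cost).

-- Python's int(c) for a single character c (none = ValueError; Pre_ excludes those inputs)
def pyIntChar (c : Char) : Int := (PySem.Int.ofStr? (String.ofList [c])).getD 0

-- ===== PORT A =====
def convert (value : String) : Int :=
  (value.toList.reverse.foldl
    (fun (st : Int × Int) val =>
      if val = '-' then (st.1 - st.2, st.2 * 5)
      else if val = '=' then (st.1 - 2 * st.2, st.2 * 5)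
      else (st.1 + pyIntChar val * st.2, st.2 * 5))
    (0, 1)).1

-- ===== PORT B =====
def convert_alt (value : String) : Int :=
  value.toList.foldl
    (fun total char =>
      let d : Int := if char = '-' then -1 else if char = '=' then -2 else pyIntChar char
      total * 5 + d)
    0

-- ===== PRECONDITION & SPEC =====
-- Pre_ excludes strings containing a character that is neither a SNAFU sign character nor an
-- ASCII digit: on such characters A's int(val) raises ValueError (B raises there too).
def Pre_convert (value : String) : Prop :=
  value.toList.all (fun c => c == '-' || c == '=' || c.isDigit) = true
instance (value : String) : Decidable (Pre_convert value) := by unfold Pre_convert; infer_instance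
def pvWitness_convert : String := "1=-0-2"

def Spec_convert (value : String) (out : Int) : Prop := out = convert_alt value
instance (value : String) (out : Int) : Decidable (Spec_convert value out) := by unfold Spec_convert; infer_instance

-- ===== CLAIM (what is proved, stated in full; the proofs are below) =====
def Claim_equal_convert : Prop := ∀ (value : String), Dom_convert value → Pre_convert value → Spec_convert value (convert value)

-- ===== LEMMAS AND PROOFS =====

def digitVal (c : Char) : Int :=
  if c = '-' then -1 else if c = '=' then -2 else pyIntChar c

lemma convert_alt_eq (value : String) :
    convert_alt value = value.toList.foldl (fun t c => t * 5 + digitVal c) 0 := by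
  simp [convert_alt, digitVal]

lemma horner_shift (l : List Char) (a : Int) :
    l.foldl (fun t c => t * 5 + digitVal c) a
      = a * 5 ^ l.length + l.foldl (fun t c => t * 5 + digitVal c) 0 := by
  induction l generalizing a with
  | nil => simp
  | cons c l ih =>
    simp only [List.foldl_cons, List.length_cons]
    rw [ih (a * 5 + digitVal c), ih (0 * 5 + digitVal c)]
    ring

lemma convertA_loop (l : List Char) (t m : Int) :
    l.reverse.foldl
      (fun (st : Int × Int) val =>
        if val = '-' then (st.1 - st.2, st.2 * 5)
        else if val = '=' then (st.1 - 2 * st.2, st.2 * 5)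
        else (st.1 + pyIntChar val * st.2, st.2 * 5))
      (t, m)
    = (t + m * l.foldl (fun a c => a * 5 + digitVal c) 0, m * 5 ^ l.length) := by
  induction l generalizing t m with
  | nil => simp
  | cons c l ih =>
    simp only [List.reverse_cons, List.foldl_append, List.foldl_cons, List.foldl_nil,
      List.length_cons, ih]
    rw [horner_shift l (0 * 5 + digitVal c)]
    by_cases h1 : c = '-'
    · simp [h1, digitVal]; constructor <;> ring
    · by_cases h2 : c = '='
      · simp [h2, digitVal]; constructor <;> ring
      · simp [h1, h2, digitVal]; constructor <;> ring

-- ===== VERDICT (by name: the statement is the Claim_ definition above) =====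
theorem convert_spec : Claim_equal_convert := by
  intro value _ _
  show convert value = convert_alt value
  rw [convert, convert_alt_eq, convertA_loop]
  simp
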